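-- pv_equiv track=rewrite | github.com/Leftfish/Advent-of-Code-2023 | 13/d13.py | get_signatures
-- ===== SOURCE A (Python) =====
-- def get_signatures(parsed_data):
--     '''Transforms lines and cols into lists of binary digits.'''
--
--     line_signatures = []
--     for line in parsed_data:
--         signature = [1 if char == '#' else 0 for char in line]
--         line_signatures.append(signature)
--
--     col_signatures = []
--     for j in range(len(parsed_data[0])):
--         signature = []
--         for i in range(len(parsed_data)):
--             char = parsed_data[i][j]
--             signature.append(1 if char == '#' else 0)
--         col_signatures.append(signature)
--     return line_signatures, col_signatures
-- ===== SOURCE B (Python) =====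
-- def get_signatures(parsed_data):
--     '''Transforms lines and cols into lists of binary digits.'''
--     width = len(parsed_data[0])
--     line_signatures = []
--     col_signatures = [[] for _ in range(width)]
--     for line in parsed_data:
--         row = [1 if char == '#' else 0 for char in line]
--         line_signatures.append(row)
--         for j in range(width):
--             col_signatures[j].append(row[j])
--     return line_signatures, col_signatures
-- ===== Notes on version B (the rewrite author's own statement) =====
-- stated objective: alternative
-- what changed: B makes a single streaming pass over the rows, maintaining one growing accumulator list per column and appending each row's bits to them, instead of A's second column-major nested index pass that re-reads the whole grid.
import Mathlib
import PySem

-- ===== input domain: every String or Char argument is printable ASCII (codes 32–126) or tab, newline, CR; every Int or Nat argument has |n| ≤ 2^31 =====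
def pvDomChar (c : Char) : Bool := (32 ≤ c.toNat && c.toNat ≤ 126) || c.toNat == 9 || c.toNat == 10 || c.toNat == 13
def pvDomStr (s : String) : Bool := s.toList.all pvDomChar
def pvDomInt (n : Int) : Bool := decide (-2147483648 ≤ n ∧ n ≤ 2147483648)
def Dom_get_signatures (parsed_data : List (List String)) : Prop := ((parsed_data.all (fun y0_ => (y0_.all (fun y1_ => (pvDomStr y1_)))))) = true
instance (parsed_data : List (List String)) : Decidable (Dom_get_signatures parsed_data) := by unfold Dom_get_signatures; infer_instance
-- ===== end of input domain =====

-- B streams the rows once, appending each row's bits to per-column accumulators,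
-- instead of A's second column-major nested index pass; objective: alternative.

-- ===== PORT A =====
-- literal transliteration of A: two append-accumulator loops, the second a nested index loop
def get_signatures (parsed_data : List (List String)) : List (List Int) × List (List Int) :=
  let line_signatures := parsed_data.foldl (fun acc line =>
    acc ++ [line.foldl (fun s char => s ++ [if char == "#" then (1 : Int) else 0]) []]) []
  -- len(parsed_data[0]): raises in Python on empty input (excluded by Pre_); headD [] here
  let col_signatures := (List.range (parsed_data.headD []).length).foldl (fun acc j =>
    acc ++ [(List.range parsed_data.length).foldl (fun s i =>
      let char := (parsed_data.getD i []).getD j ""   -- parsed_data[i][j]: in range under Pre_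
      s ++ [if char == "#" then (1 : Int) else 0]) []]) []
  (line_signatures, col_signatures)

-- ===== PORT B =====
-- single pass over the rows: state = (line_signatures, col_signatures);
-- col_signatures[j].append(row[j]) is List.modify at index j (row[j] in range under Pre_)
def get_signatures_alt (parsed_data : List (List String)) : List (List Int) × List (List Int) :=
  let width := (parsed_data.headD []).length   -- len(parsed_data[0]); raises in Python on empty input
  let st := parsed_data.foldl (fun (st : List (List Int) × List (List Int)) line =>
      let row := line.map (fun char => if char == "#" then (1 : Int) else 0)
      let cols := (List.range width).foldl (fun cs j => cs.modify j (· ++ [row.getD j 0])) st.2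
      (st.1 ++ [row], cols))
    ([], List.replicate width [])
  (st.1, st.2)

-- ===== PRECONDITION & SPEC =====
-- Pre_ excludes exactly the inputs on which A raises IndexError: the empty grid
-- (parsed_data[0]) and grids with a row shorter than the first row (parsed_data[i][j]).
def Pre_get_signatures (parsed_data : List (List String)) : Prop :=
  parsed_data ≠ [] ∧ ∀ row ∈ parsed_data, (parsed_data.headD []).length ≤ row.length
instance (parsed_data : List (List String)) : Decidable (Pre_get_signatures parsed_data) := by
  unfold Pre_get_signatures; infer_instance
def pvWitness_get_signatures : List (List String) := [["#", "."], [".", "#"]]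

def Spec_get_signatures (parsed_data : List (List String)) (out : List (List Int) × List (List Int)) : Prop := out = get_signatures_alt parsed_data
instance (parsed_data : List (List String)) (out : List (List Int) × List (List Int)) : Decidable (Spec_get_signatures parsed_data out) := by unfold Spec_get_signatures; infer_instance

-- ===== CLAIM (what is proved, stated in full; the proofs are below) =====
def Claim_equal_get_signatures : Prop := ∀ (parsed_data : List (List String)), Dom_get_signatures parsed_data → Pre_get_signatures parsed_data → Spec_get_signatures parsed_data (get_signatures parsed_data)

-- ===== LEMMAS AND PROOFS =====

-- an append-accumulator loop is a map
theorem foldl_append_map {α β : Type} (f : α → β) (l : List α) (init : List β) :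
    l.foldl (fun acc x => acc ++ [f x]) init = init ++ l.map f := by
  induction l generalizing init with
  | nil => simp
  | cons a t ih => simp [List.foldl, ih]

theorem getD_map_of_lt {α β : Type} (f : α → β) (l : List α) (j : ℕ) (d : α) (h : j < l.length) :
    (l.map f).getD j (f d) = f (l.getD j d) := by
  induction l generalizing j with
  | nil => simp at h
  | cons a t ih =>
    cases j with
    | zero => simp
    | succ j => exact ih j (by simpa using h)

-- indexing loop over range l.length is a map over l
theorem map_range_getD {α β : Type} (f : α → β) (l : List α) (d : α) :
    (List.range l.length).map (fun i => f (l.getD i d)) = l.map f := by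
  induction l with
  | nil => simp
  | cons a t ih =>
    rw [List.length_cons, List.range_succ_eq_map]
    simpa [Function.comp] using ih

-- List.modify at index n on a map over range w rewrites exactly the n-th entry
theorem modify_range_map {α : Type} : ∀ (w : ℕ) (g : ℕ → α) (f : α → α) (n : ℕ),
    ((List.range w).map g).modify n f
      = (List.range w).map (fun j => if j = n then f (g j) else g j) := by
  intro w
  induction w with
  | zero => intro g f n; simp
  | succ k ih =>
    intro g f n
    rw [List.range_succ_eq_map, List.map_cons, List.map_cons]
    simp only [List.map_map]
    cases n with
    | zero =>
      rw [List.modify_zero_cons]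
      simp [Function.comp]
    | succ m =>
      rw [List.modify_succ_cons]
      congr 1
      rw [show List.map (g ∘ Nat.succ) (List.range k)
            = List.map (fun j => g (j + 1)) (List.range k) from
          List.map_congr_left (fun j _ => rfl)]
      rw [ih (fun j => g (j + 1)) f m]
      apply List.map_congr_left
      intro j _
      by_cases h : j = m
      · subst h; simp [Function.comp]
      · simp [Function.comp, h]

-- the inner loop over range n modifies each index < n once
theorem foldl_range_modify_map {α : Type} : ∀ (n : ℕ) (g : ℕ → α) (f : ℕ → α → α) (w : ℕ),
    (List.range n).foldl (fun cs j => cs.modify j (f j)) ((List.range w).map g)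
      = (List.range w).map (fun j => if j < n then f j (g j) else g j) := by
  intro n
  induction n with
  | zero => intro g f w; simp
  | succ k ih =>
    intro g f w
    rw [List.range_succ, List.foldl_append, ih, List.foldl_cons, List.foldl_nil,
      modify_range_map]
    apply List.map_congr_left
    intro j _
    by_cases h1 : j = k
    · subst h1; simp
    · by_cases h2 : j < k
      · simp [h1, h2, Nat.lt_succ_of_lt h2]
      · have : ¬ j < k + 1 := by omega
        simp [h1, h2, this]

-- B's streaming fold, with column state (range w).map g
theorem b_fold_invariant (w : ℕ) (rowf : List String → List Int) :
    ∀ (pd : List (List String)) (lines : List (List Int)) (g : ℕ → List Int),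
    pd.foldl (fun (st : List (List Int) × List (List Int)) line =>
        let row := rowf line
        let cols := (List.range w).foldl (fun cs j => cs.modify j (· ++ [row.getD j 0])) st.2
        (st.1 ++ [row], cols))
      (lines, (List.range w).map g)
    = (lines ++ pd.map rowf,
       (List.range w).map (fun j => g j ++ pd.map (fun line => (rowf line).getD j 0))) := by
  intro pd
  induction pd with
  | nil => intro lines g; simp
  | cons line rest ih =>
    intro lines g
    simp only [List.foldl_cons]
    rw [foldl_range_modify_map]
    have hcols : (List.range w).map (fun j => if j < w then g j ++ [(rowf line).getD j 0] else g j)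
        = (List.range w).map (fun j => g j ++ [(rowf line).getD j 0]) := by
      apply List.map_congr_left
      intro j hj
      simp [List.mem_range.mp hj]
    rw [hcols, ih]
    simp

-- ===== VERDICT (by name: the statement is the Claim_ definition above) =====
theorem get_signatures_spec : Claim_equal_get_signatures := by
  intro parsed_data _ hpre
  obtain ⟨hne, hall⟩ := hpre
  show get_signatures parsed_data = get_signatures_alt parsed_data
  simp only [get_signatures, get_signatures_alt]
  set q : String → Int := fun char => if char == "#" then (1 : Int) else 0 with hq
  have hq0 : q "" = 0 := by rw [hq]; decide
  set w := (parsed_data.headD []).length with hwdef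
  set rowf : List String → List Int := fun line => line.map q with hrowf
  -- A's first loop is the row map
  have hrow : ∀ line : List String,
      line.foldl (fun s char => s ++ [if char == "#" then (1 : Int) else 0]) [] = rowf line := by
    intro line; exact foldl_append_map q line []
  have hlines : parsed_data.foldl (fun acc line =>
      acc ++ [line.foldl (fun s char => s ++ [if char == "#" then (1 : Int) else 0]) []]) []
      = parsed_data.map rowf := by
    rw [foldl_append_map (fun line : List String =>
      line.foldl (fun s char => s ++ [if char == "#" then (1 : Int) else 0]) []) parsed_data []]
    simp only [List.nil_append]
    exact List.map_congr_left (fun line _ => hrow line)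
  -- B's fold via the invariant (replicate w [] = (range w).map (const []))
  have hrepl : (List.replicate w ([] : List Int)) = (List.range w).map (fun _ => []) := by
    apply List.ext_getElem <;> simp
  have hB := b_fold_invariant w rowf parsed_data [] (fun _ => [])
  rw [hrepl]
  refine Prod.ext ?_ ?_
  · simp only [hlines]
    rw [hB]; simp
  · rw [hB]
    simp only [List.nil_append]
    -- A's outer column loop is a range map
    rw [foldl_append_map (fun j => (List.range parsed_data.length).foldl (fun s i =>
      s ++ [if ((parsed_data.getD i []).getD j "") == "#" then (1 : Int) else 0]) []) (List.range w) []]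
    simp only [List.nil_append]
    apply List.map_congr_left
    intro j hj
    have hjw : j < w := List.mem_range.mp hj
    have hinner : (List.range parsed_data.length).foldl (fun s i =>
        s ++ [if ((parsed_data.getD i []).getD j "") == "#" then (1 : Int) else 0]) []
        = (List.range parsed_data.length).map (fun i => q ((parsed_data.getD i []).getD j "")) :=
      foldl_append_map (fun i => q ((parsed_data.getD i []).getD j ""))
        (List.range parsed_data.length) []
    rw [hinner, map_range_getD (fun row => q (row.getD j "")) parsed_data []]
    apply List.map_congr_left
    intro line hline
    have hjlt : j < line.length := lt_of_lt_of_le hjw (hall line hline)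
    have h := getD_map_of_lt q line j "" hjlt
    rw [hq0] at h
    exact h.symm
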